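-- pv_equiv track=rewrite | github.com/ustankie/ASD | holidays/exams/2020-21/1_termin/zad1.py | chaos_index
-- ===== SOURCE A (Python) =====
-- def binsearch(A,x):
--     i=0
--     j=len(A)-1
--
--     while i<=j:
--         q=(i+j)//2
--         if A[q]==x:
--             return q
--         if A[q]<x:
--             i=q+1
--         else:
--             j=q-1
--     return i
--
-- def chaos_index( T ):
--     n=len(T)
--     k=0
--     for i in range(n):
--         T[i]=(T[i],i)
--     A=sorted(T)
--
--     for i in range(n):
--         x=binsearch(A,T[i])
--         curr_k=abs(i-x)
--         k=max(k,curr_k)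
--
--
--
--     return k
-- ===== SOURCE B (Python) =====
-- def chaos_index(T):
--     # Same in-place mutation as A: T[i] becomes (T[i], i).
--     n = len(T)
--     for i in range(n):
--         T[i] = (T[i], i)
--     A = sorted(T)
--     k = 0
--     for pos, (val, orig) in enumerate(A):
--         k = max(k, abs(orig - pos))
--     return k
-- ===== Notes on version B (the rewrite author's own statement) =====
-- stated objective: simpler
-- what changed: B drops the per-element binary search entirely: after sorting the (value, original-index) pairs it makes one enumerate pass over the sorted array, reading each element's sorted rank directly off its position and tracking max |orig - pos|.
import Mathlib
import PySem

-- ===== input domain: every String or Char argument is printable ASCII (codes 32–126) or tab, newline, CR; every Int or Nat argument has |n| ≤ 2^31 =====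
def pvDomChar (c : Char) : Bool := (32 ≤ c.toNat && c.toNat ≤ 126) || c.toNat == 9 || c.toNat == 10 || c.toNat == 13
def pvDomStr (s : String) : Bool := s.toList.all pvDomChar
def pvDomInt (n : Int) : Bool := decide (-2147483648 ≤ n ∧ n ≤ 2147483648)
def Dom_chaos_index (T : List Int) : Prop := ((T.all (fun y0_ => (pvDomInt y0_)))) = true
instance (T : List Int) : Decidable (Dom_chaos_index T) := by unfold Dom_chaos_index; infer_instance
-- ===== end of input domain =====

-- B replaces A's per-element binary search with a single enumerate pass over the sorted
-- array, reading each element's sorted rank off its position (objective: simpler).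
-- Both Pythons mutate T in place identically (T[i] := (T[i], i)); the theorems below are
-- about the RETURN value.

-- ===== PORT A =====
-- Python's '<' and '==' on (int, int) tuples are the lexicographic order, ported exactly
-- as Prod.Lex via toLex.  Indices handed to A[q] are always in range in A's calls, so
-- pyGetD with an unused default is exact here.
def pvBs (A : List (Int × Int)) (x : Int × Int) (i j : Int) : Int :=
  if _h : i ≤ j then
    let q := PySem.Int.floordiv (i + j) 2
    let aq := PySem.List.pyGetD A q (0, 0)
    if aq = x then q
    else if toLex aq < toLex x then pvBs A x (q + 1) j
    else pvBs A x i (q - 1)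
  else i
termination_by (j + 1 - i).toNat
decreasing_by
  · have := PySem.Int.floordiv_two_mid_bounds (lo := i) (hi := j) _h
    omega
  · have := PySem.Int.floordiv_two_mid_bounds (lo := i) (hi := j) _h
    omega

def pvBinsearch (A : List (Int × Int)) (x : Int × Int) : Int :=
  pvBs A x 0 ((A.length : Int) - 1)

def chaos_index (T : List Int) : Int :=
  let n : Int := (T.length : Int)
  let T2 : List (Int × Int) := (PySem.List.pyRange 0 n 1).map (fun i => (PySem.List.pyGetD T i 0, i))
  let A := PySem.List.sorted T2 (fun p => (toLex p : Lex (Int × Int))) false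
  (PySem.List.pyRange 0 n 1).foldl
    (fun k i => max k |i - pvBinsearch A (PySem.List.pyGetD T2 i (0, 0))|) 0

-- ===== PORT B =====
def chaos_index_alt (T : List Int) : Int :=
  let n : Int := (T.length : Int)
  let T2 : List (Int × Int) := (PySem.List.pyRange 0 n 1).map (fun i => (PySem.List.pyGetD T i 0, i))
  let A := PySem.List.sorted T2 (fun p => (toLex p : Lex (Int × Int))) false
  (PySem.List.enumerate A 0).foldl (fun k pr => max k |pr.2.2 - pr.1|) 0

-- ===== PRECONDITION & SPEC =====
def Spec_chaos_index (T : List Int) (out : Int) : Prop := out = chaos_index_alt T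
instance (T : List Int) (out : Int) : Decidable (Spec_chaos_index T out) := by unfold Spec_chaos_index; infer_instance

-- ===== CLAIM (what is proved, stated in full; the proofs are below) =====
def Claim_equal_chaos_index : Prop := ∀ (T : List Int), Dom_chaos_index T → Spec_chaos_index T (chaos_index T)

-- ===== LEMMAS AND PROOFS =====

-- Binary search on a strictly (lexicographically) increasing list finds the exact index.
theorem pvBs_eq (m : Nat) (S : List (Int × Int))
    (hS : S.Pairwise (fun a b => toLex a < toLex b))
    (p : Nat) (hp : p < S.length) (i j : Int) (hi : 0 ≤ i)
    (hj : j < (S.length : Int)) (hip : i ≤ (p : Int)) (hpj : (p : Int) ≤ j)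
    (hm : (j + 1 - i).toNat ≤ m) :
    pvBs S S[p] i j = (p : Int) := by
  induction m generalizing i j with
  | zero => omega
  | succ m ih =>
    rw [pvBs]
    have hij : i ≤ j := le_trans hip hpj
    have hq := PySem.Int.floordiv_two_mid_bounds (lo := i) (hi := j) hij
    set q := PySem.Int.floordiv (i + j) 2 with hqdef
    have hiq : i ≤ q := hq.1
    have hqj : q ≤ j := hq.2
    have hq0 : 0 ≤ q := le_trans hi hiq
    have hqlen : q < (S.length : Int) := lt_of_le_of_lt hqj hj
    have hgetq : PySem.List.pyGetD S q (0, 0) = S[q.toNat]'(by omega) := by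
      rw [PySem.List.pyGetD_eq_getElem] <;> omega
    have hmono : ∀ (a b : Nat) (ha : a < S.length) (hb : b < S.length),
        a < b → toLex (S[a]'ha) < toLex (S[b]'hb) := by
      intro a b ha hb hab
      exact (List.pairwise_iff_getElem.mp hS) a b ha hb hab
    simp only [dif_pos hij, hgetq]
    rcases lt_trichotomy q.toNat p with hlt | heq | hgt
    · have hlt' := hmono q.toNat p (by omega) hp hlt
      have hne : S[q.toNat]'(by omega) ≠ S[p] := by
        intro h; rw [h] at hlt'; exact lt_irrefl _ hlt'
      rw [if_neg hne, if_pos hlt']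
      exact ih (q + 1) j (by omega) hj (by omega) hpj (by omega)
    · have : S[q.toNat]'(by omega) = S[p] := by congr 1
      rw [if_pos this]; omega
    · have hlt' := hmono p q.toNat hp (by omega) hgt
      have hne : S[q.toNat]'(by omega) ≠ S[p] := by
        intro h; rw [h] at hlt'; exact lt_irrefl _ hlt'
      have hnlt : ¬ toLex (S[q.toNat]'(by omega)) < toLex (S[p]) := not_lt_of_gt hlt'
      rw [if_neg hne, if_neg hnlt]
      exact ih i (q - 1) hi (by omega) hip (by omega) (by omega)

theorem pvBinsearch_getElem (S : List (Int × Int))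
    (hS : S.Pairwise (fun a b => toLex a < toLex b))
    (p : Nat) (hp : p < S.length) :
    pvBinsearch S S[p] = (p : Int) := by
  exact pvBs_eq ((S.length : Int)).toNat S hS p hp 0 ((S.length : Int) - 1)
    le_rfl (by omega) (by omega) (by omega) (by omega)

-- Folding a position-dependent step over enumerate equals folding the positionless step,
-- provided they agree at each (position, element) pair of the list.
theorem foldl_enumerate_congr {α : Type} (step : Int → Int → α → Int) (step2 : Int → α → Int)
    (S : List α) (s k0 : Int)
    (h : ∀ (p : Nat) (hp : p < S.length) (k : Int), step k (s + p) (S[p]) = step2 k (S[p])) :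
    (PySem.List.enumerate S s).foldl (fun k pr => step k pr.1 pr.2) k0
      = S.foldl step2 k0 := by
  induction S generalizing s k0 with
  | nil => simp [PySem.List.enumerate_nil]
  | cons x xs ih =>
    rw [PySem.List.enumerate_cons]
    simp only [List.foldl_cons]
    have h0 := h 0 (by simp) k0
    simp at h0
    rw [h0]
    exact ih (s + 1) _ (fun p hp k => by
      have := h (p + 1) (by simpa using Nat.succ_lt_succ hp) k
      simpa [add_assoc, add_comm, add_left_comm] using this)

theorem chaos_index_spec' (T : List Int) : chaos_index T = chaos_index_alt T := by
  unfold chaos_index chaos_index_alt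
  set n : Int := (T.length : Int) with hn
  set T2 : List (Int × Int) := (PySem.List.pyRange 0 n 1).map (fun i => (PySem.List.pyGetD T i 0, i)) with hT2
  set S := PySem.List.sorted T2 (fun p => (toLex p : Lex (Int × Int))) false with hS
  -- basic facts
  have hlen2 : T2.length = T.length := by
    simp [hT2, PySem.List.length_pyRange_one, hn]
  have hperm : S.Perm T2 := PySem.List.sorted_perm _ _ _
  have hnodup2 : T2.Nodup := by
    exact List.Nodup.map (fun a b hab => congrArg Prod.snd hab)
      (PySem.List.nodup_pyRange_one 0 n)
  have hnodupS : S.Nodup := hperm.nodup_iff.mpr hnodup2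
  have hpwS : S.Pairwise (fun a b => toLex a < toLex b) := by
    have hle : S.Pairwise (fun a b => (toLex a : Lex (Int × Int)) ≤ toLex b) :=
      PySem.List.sorted_pairwise _ _
    have hne : S.Pairwise (fun a b => a ≠ b) := hnodupS
    refine (hle.and hne).imp ?_
    rintro a b ⟨h1, h2⟩
    exact lt_of_le_of_ne h1 (by simpa using h2)
  have hlenS : S.length = T2.length := hperm.length_eq
  -- A side: replace i by (T2[i]).2 inside the loop, then fold over T2 itself
  have hA : (PySem.List.pyRange 0 n 1).foldl
      (fun k i => max k |i - pvBinsearch S (PySem.List.pyGetD T2 i (0, 0))|) 0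
      = T2.foldl (fun k pr => max k |pr.2 - pvBinsearch S pr|) 0 := by
    rw [PySem.List.foldl_congr_mem
      (g := fun k i => max k |(PySem.List.pyGetD T2 i (0, 0)).2 - pvBinsearch S (PySem.List.pyGetD T2 i (0, 0))|)]
    · have : n = (T2.length : Int) := by rw [hlen2, hn]
      rw [this]
      exact PySem.List.foldl_pyRange_zero_pyGetD T2 (0, 0) (fun k pr => max k |pr.2 - pvBinsearch S pr|) 0
    · intro acc x hx
      have hx' := (PySem.List.mem_pyRange_one).mp hx
      rw [hT2, PySem.List.pyGetD_map_pyRange_of_nonneg _ _ _ _ hx'.1 hx'.2]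
  -- B side: each element's position in S is what binary search returns
  have hB : (PySem.List.enumerate S 0).foldl (fun k pr => max k |pr.2.2 - pr.1|) 0
      = S.foldl (fun k pr => max k |pr.2 - pvBinsearch S pr|) 0 := by
    exact foldl_enumerate_congr (fun k p x => max k |x.2 - p|)
      (fun k x => max k |x.2 - pvBinsearch S x|) S 0 0
      (fun p hp k => by
        show max k |(S[p]'hp).2 - (0 + (p : Int))| = max k |(S[p]'hp).2 - pvBinsearch S (S[p]'hp)|
        rw [pvBinsearch_getElem S hpwS p hp]; norm_num)
  rw [hA, hB]
  refine (hperm.foldl_eq' (fun x _ y _ z => ?_) 0).symm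
  show max (max z |x.2 - pvBinsearch S x|) |y.2 - pvBinsearch S y|
      = max (max z |y.2 - pvBinsearch S y|) |x.2 - pvBinsearch S x|
  rw [max_right_comm]

-- ===== VERDICT (by name: the statement is the Claim_ definition above) =====
theorem chaos_index_spec : Claim_equal_chaos_index := by
  intro T _
  unfold Spec_chaos_index
  exact chaos_index_spec' T
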